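-- pv_equiv track=rewrite | github.com/KiritoFD/Latent_Style | Cycle-NCE/plot-swd.py | resolve_subspace_modes
-- ===== SOURCE A (Python) =====
-- from typing import Dict, List, Tuple, Optional
--
-- def resolve_subspace_modes(subspace_args: List[str]) -> List[str]:
--     base = ["none", "pca", "zca", "lda"]
--     out: List[str] = []
--     for s in subspace_args:
--         if s == "all":
--             for x in base:
--                 if x not in out:
--                     out.append(x)
--         elif s in base and s not in out:
--             out.append(s)
--     if not out:
--         out = base.copy()
--     return out
-- ===== SOURCE B (Python) =====
-- from typing import List
--
-- def resolve_subspace_modes(subspace_args: List[str]) -> List[str]: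
--     base = ["none", "pca", "zca", "lda"]
--     # pass 1: flat expansion, no filtering or dedup
--     expansion: List[str] = []
--     for s in subspace_args:
--         if s == "all":
--             expansion.extend(base)
--         else:
--             expansion.append(s)
--     # pass 2: filter to known modes, dedup preserving first appearance
--     out: List[str] = []
--     for x in expansion:
--         if x in base and x not in out:
--             out.append(x)
--     if not out:
--         out = base.copy()
--     return out
-- ===== Notes on version B (the rewrite author's own statement) =====
-- stated objective: alternative
-- what changed: A's single loop that branches on 'all' and dedups while appending is replaced by two distinct passes: first a flat expansion of tokens ('all' -> whole base list), then a separate filter/dedup pass over the expansion.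
import Mathlib
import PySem

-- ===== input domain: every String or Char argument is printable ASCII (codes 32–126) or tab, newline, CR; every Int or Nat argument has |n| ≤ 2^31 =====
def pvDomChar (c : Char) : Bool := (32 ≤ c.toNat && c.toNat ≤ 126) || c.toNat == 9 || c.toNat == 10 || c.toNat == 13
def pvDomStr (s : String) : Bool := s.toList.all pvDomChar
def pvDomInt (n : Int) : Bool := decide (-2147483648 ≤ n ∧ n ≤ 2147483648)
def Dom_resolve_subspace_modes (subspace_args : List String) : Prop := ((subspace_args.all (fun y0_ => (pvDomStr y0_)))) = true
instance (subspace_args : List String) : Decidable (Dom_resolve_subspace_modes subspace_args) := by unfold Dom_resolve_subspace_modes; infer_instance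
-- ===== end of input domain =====

-- B replaces A's combined branch-and-dedup loop by an expand pass followed by a separate filter/dedup pass (alternative decomposition, same cost).

-- ===== PORT A =====
def pvBase : List String := ["none", "pca", "zca", "lda"]

-- inner loop of A's 'all' branch
def pvStepAll (out : List String) (x : String) : List String :=
  if out.contains x then out else out ++ [x]

-- one iteration of A's main loop
def pvStepA (out : List String) (s : String) : List String :=
  if s == "all" then pvBase.foldl pvStepAll out
  else if pvBase.contains s && !(out.contains s) then out ++ [s]
  else out

def resolve_subspace_modes (subspace_args : List String) : List String :=
  let out := subspace_args.foldl pvStepA []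
  if out.isEmpty then pvBase else out

-- ===== PORT B =====
-- pass 1 step: extend with base on "all", else append the token
def pvExpStep (acc : List String) (s : String) : List String :=
  if s == "all" then acc ++ pvBase else acc ++ [s]

-- pass 2 step: keep x if it is a known mode and not seen yet
def pvFiltStep (out : List String) (x : String) : List String :=
  if pvBase.contains x && !(out.contains x) then out ++ [x] else out

def resolve_subspace_modes_alt (subspace_args : List String) : List String :=
  let expansion := subspace_args.foldl pvExpStep []
  let out := expansion.foldl pvFiltStep []
  if out.isEmpty then pvBase else out

-- ===== PRECONDITION & SPEC =====
def Spec_resolve_subspace_modes (subspace_args : List String) (out : List String) : Prop := out = resolve_subspace_modes_alt subspace_args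
instance (subspace_args : List String) (out : List String) : Decidable (Spec_resolve_subspace_modes subspace_args out) := by unfold Spec_resolve_subspace_modes; infer_instance

-- ===== CLAIM (what is proved, stated in full; the proofs are below) =====
def Claim_equal_resolve_subspace_modes : Prop := ∀ (subspace_args : List String), Dom_resolve_subspace_modes subspace_args → Spec_resolve_subspace_modes subspace_args (resolve_subspace_modes subspace_args)

-- ===== LEMMAS AND PROOFS =====

-- ===== VERDICT (by name: the statement is the Claim_ definition above) =====
-- the expansion pass distributes over cons: foldl from any accumulator is that accumulator ++ the expansion
theorem pvExp_acc (l : List String) (acc : List String) :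
    l.foldl pvExpStep acc = acc ++ l.foldl pvExpStep [] := by
  induction l generalizing acc with
  | nil => simp
  | cons s rest ih =>
    simp only [List.foldl_cons]
    rw [ih, ih (pvExpStep [] s)]
    simp [pvExpStep]
    split <;> simp

-- on elements of pvBase, A's inner 'all' step agrees with B's filter step
theorem pvFold_all_eq (l : List String) (h : ∀ x ∈ l, pvBase.contains x = true) (out : List String) :
    l.foldl pvStepAll out = l.foldl pvFiltStep out := by
  induction l generalizing out with
  | nil => rfl
  | cons x rest ih =>
    simp only [List.foldl_cons]
    have hx : pvBase.contains x = true := h x (by simp)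
    have : pvStepAll out x = pvFiltStep out x := by
      simp [pvStepAll, pvFiltStep]
      split <;> simp_all
    rw [this]
    exact ih (fun y hy => h y (by simp [hy])) _

-- main invariant: A's combined fold equals B's filter fold over the expansion
theorem pvMain (args : List String) (out : List String) :
    args.foldl pvStepA out = (args.foldl pvExpStep []).foldl pvFiltStep out := by
  induction args generalizing out with
  | nil => rfl
  | cons s rest ih =>
    simp only [List.foldl_cons]
    rw [ih, pvExp_acc rest (pvExpStep [] s), List.foldl_append]
    congr 1
    by_cases hs : s == "all"
    · simp [pvStepA, pvExpStep, hs]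
      exact pvFold_all_eq pvBase (fun x hx => by simpa using hx) out
    · simp [pvStepA, pvExpStep, hs, pvFiltStep]

-- ===== VERDICT =====
theorem resolve_subspace_modes_spec : Claim_equal_resolve_subspace_modes := by
  intro args _
  unfold Spec_resolve_subspace_modes resolve_subspace_modes resolve_subspace_modes_alt
  rw [pvMain]
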